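-- pv_equiv track=rewrite | github.com/quivXe/ip_conversion | main.py | ip_to_list
-- ===== SOURCE A (Python) =====
-- def ip_to_list(ip):
--     lista = []
--     tmp = ''
--     for let in ip:
--         if let != '.':
--             tmp += let
--         else:
--             lista.append(int(tmp))
--             tmp = ''
--     lista.append(int(tmp))
--     return lista
-- ===== SOURCE B (Python) =====
-- def ip_to_list(ip):
--     return [int(seg) for seg in ip.split('.')]
-- ===== Notes on version B (the rewrite author's own statement) =====
-- stated objective: idiomatic
-- what changed: B replaces A's manual char-by-char scan with a '.'-branch and string accumulator by the standard split-then-convert: str.split('.') tokenizes, a comprehension maps int over the segments.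
import Mathlib
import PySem

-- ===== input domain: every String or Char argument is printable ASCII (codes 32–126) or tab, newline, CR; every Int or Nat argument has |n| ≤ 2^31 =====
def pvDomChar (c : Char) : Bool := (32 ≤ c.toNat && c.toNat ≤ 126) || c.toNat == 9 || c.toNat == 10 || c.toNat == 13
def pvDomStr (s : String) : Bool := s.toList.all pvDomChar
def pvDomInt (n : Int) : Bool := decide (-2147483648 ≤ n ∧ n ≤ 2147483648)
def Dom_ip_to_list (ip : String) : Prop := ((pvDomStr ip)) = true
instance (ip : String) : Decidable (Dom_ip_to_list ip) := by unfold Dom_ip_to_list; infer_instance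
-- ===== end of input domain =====

-- B replaces A's manual char-by-char scan (string accumulator, '.'-branch) by the
-- idiomatic split-then-convert: split on '.' and map int over the segments.

-- ===== PORT A =====
-- char loop with state (lista, tmp); int(tmp) is PySem.Int.ofChars?; on inputs
-- admitted by Pre_ every segment parses, so the .getD 0 default is never taken.
def ip_to_list (ip : String) : List Int :=
  let st := ip.toList.foldl
    (fun (st : List Int × List Char) c =>
      if c ≠ '.' then (st.1, st.2 ++ [c])
      else (st.1 ++ [(PySem.Int.ofChars? st.2).getD 0], []))
    ([], [])
  st.1 ++ [(PySem.Int.ofChars? st.2).getD 0]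

-- ===== PORT B =====
-- ip.split('.') then map int; split? is some since "." ≠ "".
def ip_to_list_alt (ip : String) : List Int :=
  ((PySem.Str.split? ip ".").getD []).map (fun seg => (PySem.Int.ofStr? seg).getD 0)

-- ===== PRECONDITION & SPEC =====
-- Pre_ excludes exactly the inputs where Python's int() raises ValueError on some
-- '.'-separated segment: there both A and B raise.
def Pre_ip_to_list (ip : String) : Prop :=
  ∀ seg ∈ PySem.Chars.splitOn ip.toList ['.'], (PySem.Int.ofChars? seg).isSome = true
instance (ip : String) : Decidable (Pre_ip_to_list ip) := by unfold Pre_ip_to_list; infer_instance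
def pvWitness_ip_to_list : String := "192.168.0.1"

def Spec_ip_to_list (ip : String) (out : List Int) : Prop := out = ip_to_list_alt ip
instance (ip : String) (out : List Int) : Decidable (Spec_ip_to_list ip out) := by unfold Spec_ip_to_list; infer_instance

-- ===== CLAIM (what is proved, stated in full; the proofs are below) =====
def Claim_equal_ip_to_list : Prop := ∀ (ip : String), Dom_ip_to_list ip → Pre_ip_to_list ip → Spec_ip_to_list ip (ip_to_list ip)

-- ===== LEMMAS AND PROOFS =====

-- plain structural recursion characterising splitting on '.'
def splitDot (tmp : List Char) : List Char → List (List Char)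
  | [] => [tmp]
  | c :: rest => if c = '.' then tmp :: splitDot [] rest else splitDot (tmp ++ [c]) rest

theorem splitOn_go_dot (fuel : Nat) :
    ∀ (l cur : List Char) (acc : List (List Char)), l.length ≤ fuel →
    PySem.Chars.splitOn.go ['.'] fuel l cur acc = acc.reverse ++ splitDot cur.reverse l := by
  induction fuel with
  | zero =>
    intro l cur acc h
    have : l = [] := List.length_eq_zero_iff.mp (Nat.le_zero.mp h)
    subst this
    simp [PySem.Chars.splitOn.go.eq_def, splitDot]
  | succ n ih =>
    intro l cur acc h
    cases l with
    | nil => simp [PySem.Chars.splitOn.go.eq_def, splitDot]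
    | cons c rest =>
      rw [PySem.Chars.splitOn.go.eq_def]
      simp only [List.isPrefixOf, Bool.and_true]
      by_cases hc : c = '.'
      · subst hc
        simp only [beq_self_eq_true, if_pos, List.length_cons, List.drop_succ_cons,
          List.length_nil, List.drop_zero]
        rw [ih rest [] (cur.reverse :: acc) (by simpa using Nat.lt_succ_iff.mp (by simpa using h))]
        simp [splitDot]
      · have : ('.' == c) = false := beq_eq_false_iff_ne.mpr (Ne.symm hc)
        simp only [this, Bool.false_eq_true, if_false]
        rw [ih rest (c :: cur) acc (by simpa using Nat.lt_succ_iff.mp (by simpa using h))]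
        simp [splitDot, hc]

theorem splitOn_dot (l : List Char) :
    PySem.Chars.splitOn l ['.'] = splitDot [] l := by
  unfold PySem.Chars.splitOn
  rw [splitOn_go_dot (l.length + 1) l [] [] (Nat.le_succ _)]
  simp

theorem fold_eq_splitDot (l : List Char) :
    ∀ (lista : List Int) (tmp : List Char),
    (let st := l.foldl
      (fun (st : List Int × List Char) c =>
        if c ≠ '.' then (st.1, st.2 ++ [c])
        else (st.1 ++ [(PySem.Int.ofChars? st.2).getD 0], []))
      (lista, tmp)
     st.1 ++ [(PySem.Int.ofChars? st.2).getD 0])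
    = lista ++ (splitDot tmp l).map (fun cs => (PySem.Int.ofChars? cs).getD 0) := by
  induction l with
  | nil => intro lista tmp; simp [splitDot]
  | cons c rest ih =>
    intro lista tmp
    by_cases hc : c = '.'
    · subst hc
      simp only [List.foldl_cons, ne_eq, not_true_eq_false, if_false]
      rw [ih]
      simp [splitDot]
    · simp only [List.foldl_cons, ne_eq, hc, not_false_eq_true, if_true]
      rw [ih]
      simp [splitDot, hc]

-- ===== VERDICT (by name: the statement is the Claim_ definition above) =====
theorem ip_to_list_spec : Claim_equal_ip_to_list := by
  intro ip _ _
  unfold Spec_ip_to_list ip_to_list ip_to_list_alt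
  rw [fold_eq_splitDot]
  unfold PySem.Str.split?
  simp only [PySem.Chars.split?]
  have hsep : (".".toList : List Char) = ['.'] := rfl
  rw [hsep]
  simp [splitOn_dot, List.map_map, Function.comp, PySem.Int.ofStr?]
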